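-- pv_equiv track=rewrite | github.com/danielabotezatu/PythonCourse_Homeworks | Homeworks/Tic Tac Toe.py | modelare_matrix
-- ===== SOURCE A (Python) =====
-- def modelare_matrix(matrix):
--     string = "\n"
--     for line in range(len(matrix)-1):
--         string += "  |  ".join(matrix[line])
--         string += "\n"
--         string += "_____________"
--         string += "\n"
--         string += "             "
--         string += "\n"
--
--     string += "  |  ".join(matrix[len(matrix)-1])
--     string += "\n"
--
--     return string
-- ===== SOURCE B (Python) =====
-- def modelare_matrix(matrix):
--     def render_row(cells):
--         if not cells:
--             return ""
--         return cells[0] + "".join("  |  " + c for c in cells[1:])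
--
--     def render(rows):
--         if len(rows) == 1:
--             return render_row(rows[0]) + "\n"
--         return render_row(rows[0]) + "\n_____________\n             \n" + render(rows[1:])
--
--     return "\n" + render(matrix)
-- ===== Notes on version B (the rewrite author's own statement) =====
-- stated objective: alternative
-- what changed: A's index-driven accumulation over range(len-1) with a special-cased last row is replaced by structural recursion over the row list, and each row is rendered as its first cell plus a concatenation of ' | '-prefixed remaining cells instead of a ' | '.join.
-- outside the precondition, e.g. on modelare_matrix([]): A raises IndexError, B raises IndexError
import Mathlib
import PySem

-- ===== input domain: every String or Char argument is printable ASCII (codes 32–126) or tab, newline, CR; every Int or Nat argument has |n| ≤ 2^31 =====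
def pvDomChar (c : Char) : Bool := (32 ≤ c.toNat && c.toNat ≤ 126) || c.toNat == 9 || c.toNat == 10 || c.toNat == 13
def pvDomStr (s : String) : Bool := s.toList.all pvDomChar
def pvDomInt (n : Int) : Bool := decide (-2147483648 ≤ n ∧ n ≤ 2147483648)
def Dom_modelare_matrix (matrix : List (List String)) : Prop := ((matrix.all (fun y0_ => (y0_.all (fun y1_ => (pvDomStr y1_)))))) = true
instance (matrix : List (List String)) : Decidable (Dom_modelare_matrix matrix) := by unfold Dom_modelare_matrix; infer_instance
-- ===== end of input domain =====

-- B replaces A's index-driven accumulation loop (with its special-cased last row) by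
-- structural recursion over the row list, rendering each row as its first cell followed
-- by the concatenation of '  |  '-prefixed remaining cells: a different decomposition.

-- ===== PORT A =====
-- literal transliteration of A: foldl over range(len(matrix)-1) appending the joined row
-- and the four separator pieces, then the last row via matrix[len(matrix)-1]
-- (pyGetD with default []: the index is in range for every matrix admitted by Pre_).
def modelare_matrix (matrix : List (List String)) : String :=
  let string : String := "\n"
  let string := (PySem.List.pyRange 0 ((matrix.length : Int) - 1) 1).foldl
    (fun s line =>
      s ++ PySem.Str.join "  |  " (PySem.List.pyGetD matrix line [])
        ++ "\n" ++ "_____________" ++ "\n" ++ "             " ++ "\n") string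
  string ++ PySem.Str.join "  |  " (PySem.List.pyGetD matrix ((matrix.length : Int) - 1) []) ++ "\n"

-- ===== PORT B =====
-- Source B's render_row: first cell, then ''.join of '  |  '-prefixed remaining cells
def pvRenderRow (cells : List String) : String :=
  match cells with
  | [] => ""
  | c :: rest => c ++ PySem.Str.join "" (rest.map (fun x => "  |  " ++ x))

-- Source B's render: structural recursion; on [] Python raises IndexError (rows[0]),
-- excluded by Pre_, so the [] clause's value is never claimed.
def pvRender : List (List String) → String
  | [] => ""
  | [r] => pvRenderRow r ++ "\n"
  | r :: rest => pvRenderRow r ++ "\n_____________\n             \n" ++ pvRender rest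

def modelare_matrix_alt (matrix : List (List String)) : String :=
  "\n" ++ pvRender matrix

-- ===== PRECONDITION & SPEC =====
-- Pre_ excludes only the empty matrix, on which both A and B raise IndexError.
def Pre_modelare_matrix (matrix : List (List String)) : Prop := matrix ≠ []
instance (matrix : List (List String)) : Decidable (Pre_modelare_matrix matrix) := by unfold Pre_modelare_matrix; infer_instance
def pvWitness_modelare_matrix : List (List String) := [["X", "O", "X"], ["O", "X", "O"], ["X", "O", "X"]]

def Spec_modelare_matrix (matrix : List (List String)) (out : String) : Prop := out = modelare_matrix_alt matrix
instance (matrix : List (List String)) (out : String) : Decidable (Spec_modelare_matrix matrix out) := by unfold Spec_modelare_matrix; infer_instance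

-- ===== CLAIM =====
def Claim_equal_modelare_matrix : Prop := ∀ (matrix : List (List String)), Dom_modelare_matrix matrix → Pre_modelare_matrix matrix → Spec_modelare_matrix matrix (modelare_matrix matrix)

-- ===== LEMMAS AND PROOFS =====

-- join over a cons with a nonempty tail peels off 'head ++ sep'
theorem str_join_cons_of_ne_nil (sep x : String) (m : List String) (h : m ≠ []) :
    PySem.Str.join sep (x :: m) = x ++ sep ++ PySem.Str.join sep m := by
  obtain ⟨y, t, rfl⟩ := List.exists_cons_of_ne_nil h
  rw [String.ext_iff]
  simp [PySem.Str.toList_join, PySem.Chars.join_cons_cons]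

theorem str_join_singleton (sep z : String) :
    PySem.Str.join sep [z] = z := by
  rw [String.ext_iff]
  simp [PySem.Str.toList_join, PySem.Chars.join_singleton]

-- join with empty separator concatenates
theorem str_join_empty_cons (y : String) (l : List String) :
    PySem.Str.join "" (y :: l) = y ++ PySem.Str.join "" l := by
  cases l with
  | nil =>
    rw [String.ext_iff]
    simp [PySem.Str.toList_join, PySem.Chars.join_singleton, PySem.Chars.join_nil]
  | cons z t =>
    rw [str_join_cons_of_ne_nil _ _ _ (by simp), String.ext_iff]
    simp

-- B's row renderer computes A's '  |  '.join of the cells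
theorem renderRow_eq_join (cells : List String) :
    pvRenderRow cells = PySem.Str.join "  |  " cells := by
  cases cells with
  | nil =>
    rw [String.ext_iff]
    simp [pvRenderRow, PySem.Str.toList_join, PySem.Chars.join_nil]
  | cons c rest =>
    simp only [pvRenderRow]
    induction rest generalizing c with
    | nil =>
      rw [str_join_singleton, String.ext_iff]
      simp [PySem.Str.toList_join, PySem.Chars.join_nil]
    | cons x t ih =>
      rw [List.map_cons, str_join_empty_cons,
        str_join_cons_of_ne_nil _ _ _ (by simp), ← ih x, String.ext_iff]
      simp [String.toList_append]

-- B's recursion equals join of the mapped rows followed by a newline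
theorem render_eq_join (m : List (List String)) (h : m ≠ []) :
    pvRender m
      = PySem.Str.join "\n_____________\n             \n"
          (m.map (fun r => PySem.Str.join "  |  " r)) ++ "\n" := by
  induction m with
  | nil => exact absurd rfl h
  | cons r rest ih =>
    cases rest with
    | nil =>
      simp only [pvRender, List.map_cons, List.map_nil, str_join_singleton,
        renderRow_eq_join]
    | cons x t =>
      simp only [pvRender, List.map_cons] at ih ⊢
      rw [renderRow_eq_join, ih (by simp), String.ext_iff]
      simp [PySem.Str.toList_join, PySem.Chars.join_cons_cons, String.toList_append]

-- A's accumulation loop followed by the last row equals join of the mapped rows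
theorem foldl_sep_join (sep : String) (f : List String → String)
    (l : List (List String)) (z : List String) (init : String) :
    l.foldl (fun s r => s ++ f r ++ sep) init ++ f z
      = init ++ PySem.Str.join sep ((l ++ [z]).map f) := by
  induction l generalizing init with
  | nil => simp [str_join_singleton]
  | cons x t ih =>
    simp only [List.foldl_cons, List.cons_append, List.map_cons]
    rw [ih, str_join_cons_of_ne_nil]
    · simp [String.append_assoc]
    · simp

-- the four appended separator pieces form one separator string
theorem sep_pieces (s : String) :
    s ++ "\n" ++ "_____________" ++ "\n" ++ "             " ++ "\n"
      = s ++ "\n_____________\n             \n" := by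
  rw [String.ext_iff]
  simp [String.toList_append]

theorem modelare_matrix_eq_alt (matrix : List (List String)) (h : matrix ≠ []) :
    modelare_matrix matrix = modelare_matrix_alt matrix := by
  simp only [modelare_matrix, modelare_matrix_alt]
  rw [render_eq_join matrix h]
  have hlen : ((matrix.length : Int) - 1) = (matrix.dropLast.length : Int) := by
    have := List.length_pos_of_ne_nil h
    simp [List.length_dropLast]
    omega
  have hlast : PySem.List.pyGetD matrix ((matrix.length : Int) - 1) []
      = matrix.getLast h := by
    have h1 : matrix.length - 1 < matrix.length := by
      have := List.length_pos_of_ne_nil h; omega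
    have : ((matrix.length : Int) - 1) = ((matrix.length - 1 : Nat) : Int) := by
      have := List.length_pos_of_ne_nil h; omega
    rw [this, PySem.List.pyGetD_natCast, List.getD_eq_getElem _ _ h1,
      List.getLast_eq_getElem]
  have hbody : ∀ (s : String) (j : Int), j ∈ PySem.List.pyRange 0 ((matrix.length : Int) - 1) 1 →
      (s ++ PySem.Str.join "  |  " (PySem.List.pyGetD matrix j [])
        ++ "\n" ++ "_____________" ++ "\n" ++ "             " ++ "\n")
      = (s ++ PySem.Str.join "  |  " (PySem.List.pyGetD matrix.dropLast j [])
        ++ "\n_____________\n             \n") := by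
    intro s j hj
    rw [PySem.List.mem_pyRange_one] at hj
    obtain ⟨hj0, hjlt⟩ := hj
    obtain ⟨k, rfl⟩ := Int.eq_ofNat_of_zero_le hj0
    have hk : k < matrix.dropLast.length := by
      simp [List.length_dropLast]; omega
    have hk' : k < matrix.length := by
      have hd : matrix.dropLast.length = matrix.length - 1 := List.length_dropLast
      omega
    rw [sep_pieces]
    rw [PySem.List.pyGetD_natCast, PySem.List.pyGetD_natCast,
      List.getD_eq_getElem _ _ hk, List.getD_eq_getElem _ _ hk',
      List.getElem_dropLast]
  have hfold := List.foldl_ext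
    (f := fun (s : String) (line : Int) =>
      s ++ PySem.Str.join "  |  " (PySem.List.pyGetD matrix line [])
        ++ "\n" ++ "_____________" ++ "\n" ++ "             " ++ "\n")
    (g := fun (s : String) (r : Int) =>
      s ++ PySem.Str.join "  |  " (PySem.List.pyGetD matrix.dropLast r [])
        ++ "\n_____________\n             \n")
    (l := PySem.List.pyRange 0 ((matrix.length : Int) - 1) 1)
    (a := "\n") (H := fun acc x hx => hbody acc x hx)
  rw [hlast, hfold]
  rw [hlen, PySem.List.foldl_pyRange_zero_pyGetD' matrix.dropLast []
      (fun s r => s ++ PySem.Str.join "  |  " r ++ "\n_____________\n             \n") "\n"]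
  rw [foldl_sep_join, List.dropLast_append_getLast h]
  simp [String.append_assoc]

-- ===== VERDICT =====
theorem modelare_matrix_spec : Claim_equal_modelare_matrix := by
  intro matrix _ hpre
  exact modelare_matrix_eq_alt matrix hpre
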